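-- pv_equiv track=rewrite | github.com/IDYMI/nyist-online | main.py | lencode
-- ===== SOURCE A (Python) =====
-- def lencode(msg, key):
--     l = len(msg)
--     ll = (l - 1) << 2
--     if key:
--         m = msg[l - 1]
--         if m < ll - 3 or m > ll:
--             raise ValueError("Invalid length in lencode")
--         ll = m
--     result = []
--     for i in range(l):
--         result.append(
--             chr(msg[i] & 0xFF)
--             + chr((msg[i] >> 8) & 0xFF)
--             + chr((msg[i] >> 16) & 0xFF)
--             + chr((msg[i] >> 24) & 0xFF)
--         )
--     return "".join(result)[:ll] if key else "".join(result)
-- ===== SOURCE B (Python) =====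
-- def lencode(msg, key):
--     l = len(msg)
--     ll = (l - 1) << 2
--     if key:
--         m = msg[l - 1]
--         if m < ll - 3 or m > ll:
--             raise ValueError("Invalid length in lencode")
--         ll = m
--     def pack(lo, hi):
--         if hi - lo <= 1:
--             return (msg[lo] & 0xFFFFFFFF) if hi > lo else 0
--         mid = (lo + hi) // 2
--         return pack(lo, mid) | (pack(mid, hi) << (32 * (mid - lo)))
--     n = pack(0, l)
--     s = n.to_bytes(4 * l, "little").decode("latin-1")
--     return s[:ll] if key else s
-- ===== Notes on version B (the rewrite author's own statement) =====
-- stated objective: alternative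
-- what changed: B assembles the whole message into one arbitrary-precision integer by divide-and-conquer (recursively packing each half and combining with a shift-or), then serializes that single number once with int.to_bytes(4*l,'little'), instead of A's per-word loop emitting four chr() characters per element and joining a list of strings.
import Mathlib
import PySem

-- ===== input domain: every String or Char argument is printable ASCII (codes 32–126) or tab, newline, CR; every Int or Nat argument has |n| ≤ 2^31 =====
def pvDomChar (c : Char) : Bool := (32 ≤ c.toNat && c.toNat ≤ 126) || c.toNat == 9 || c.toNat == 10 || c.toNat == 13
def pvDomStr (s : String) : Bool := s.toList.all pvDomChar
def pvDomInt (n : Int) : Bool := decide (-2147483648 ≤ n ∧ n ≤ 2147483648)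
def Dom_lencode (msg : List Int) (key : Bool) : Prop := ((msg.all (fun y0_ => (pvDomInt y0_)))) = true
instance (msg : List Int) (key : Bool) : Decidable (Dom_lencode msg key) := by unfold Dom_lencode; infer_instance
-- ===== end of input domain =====

-- B assembles the message into one big integer by divide-and-conquer shift-or packing and
-- serializes that single number once with to_bytes, instead of A's per-word chr() loop
-- (objective: alternative; not claimed faster).

-- ===== PORT A =====
-- literal port of A: per element, four chars from shifts and & 0xFF, collected in a list and joined;
-- msg[l-1] (IndexError on empty) and the ValueError guard are the inputs Pre_lencode excludes.
def lencode (msg : List Int) (key : Bool) : String :=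
  let l : Int := msg.length
  let ll0 : Int := (l - 1) <<< (2 : Nat)
  let ll : Int := if key then PySem.List.pyGetD msg (l - 1) 0 else ll0
  let result : List (List Char) :=
    (PySem.List.pyRange 0 l 1).foldl
      (fun acc i =>
        let x := PySem.List.pyGetD msg i 0
        acc ++ [[Char.ofNat (PySem.Int.band x 255).toNat,
                 Char.ofNat (PySem.Int.band (x >>> (8 : Nat)) 255).toNat,
                 Char.ofNat (PySem.Int.band (x >>> (16 : Nat)) 255).toNat,
                 Char.ofNat (PySem.Int.band (x >>> (24 : Nat)) 255).toNat]]) []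
  if key then String.ofList (PySem.List.slice (PySem.Chars.join [] result) none (some ll))
  else String.ofList (PySem.Chars.join [] result)

-- ===== PORT B =====
-- x & 0xFFFFFFFF: a nonnegative int < 2^32, kept as Nat
def mask32 (x : Int) : Nat := (PySem.Int.band x 4294967295).toNat

-- n.to_bytes(k, "little").decode("latin-1"): the k little-endian base-256 digit chars of n
-- (exact for 0 ≤ n < 256^k, which B guarantees)
def toBytesLE : Nat → Nat → List Char
  | 0, _ => []
  | k + 1, n => Char.ofNat (n % 256) :: toBytesLE k (n / 256)

-- literal port of B's pack(lo, hi): the words msg[lo:hi] packed little-endian into one number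
-- by recursive halving; lo, hi are always in [0, len(msg)], so they are Nat and '//2' is Nat division
def pack (msg : List Int) (lo hi : Nat) : Nat :=
  if hi - lo ≤ 1 then
    if lo < hi then mask32 (PySem.List.pyGetD msg (lo : Int) 0) else 0
  else
    let mid := (lo + hi) / 2
    pack msg lo mid ||| (pack msg mid hi <<< (32 * (mid - lo)))
termination_by hi - lo
decreasing_by all_goals omega

def lencode_alt (msg : List Int) (key : Bool) : String :=
  let l : Int := msg.length
  let ll0 : Int := (l - 1) <<< (2 : Nat)
  let ll : Int := if key then PySem.List.pyGetD msg (l - 1) 0 else ll0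
  let n : Nat := pack msg 0 msg.length
  let s : List Char := toBytesLE (4 * msg.length) n
  if key then String.ofList (PySem.List.slice s none (some ll)) else String.ofList s

-- ===== PRECONDITION & SPEC =====
-- Pre_ excludes exactly the inputs where A raises: key=True with empty msg (IndexError on msg[l-1])
-- and key=True with last element outside [4*(l-1)-3, 4*(l-1)] (ValueError).
def Pre_lencode (msg : List Int) (key : Bool) : Prop :=
  key = true → msg ≠ [] ∧
    4 * ((msg.length : Int) - 1) - 3 ≤ msg.getLastD 0 ∧ msg.getLastD 0 ≤ 4 * ((msg.length : Int) - 1)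
instance (msg : List Int) (key : Bool) : Decidable (Pre_lencode msg key) := by
  unfold Pre_lencode; infer_instance

def pvWitness_lencode : List Int × Bool := ([0], true)

def Spec_lencode (msg : List Int) (key : Bool) (out : String) : Prop := out = lencode_alt msg key
instance (msg : List Int) (key : Bool) (out : String) : Decidable (Spec_lencode msg key out) := by
  unfold Spec_lencode; infer_instance

-- ===== CLAIM (what is proved, stated in full; the proofs are below) =====
def Claim_equal_lencode : Prop := ∀ (msg : List Int) (key : Bool), Dom_lencode msg key → Pre_lencode msg key → Spec_lencode msg key (lencode msg key)

-- ===== LEMMAS AND PROOFS =====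

theorem band_255_eq_emod (x : Int) : PySem.Int.band x 255 = x % 256 := by
  unfold PySem.Int.band
  split_ifs with h h2 h3
  · have e : (255 : Int).toNat = 2 ^ 8 - 1 := by decide
    rw [e, Nat.and_two_pow_sub_one_eq_mod]
    omega
  · exact absurd (by decide) h2
  · have e : ((255 : Int).toNat &&& (-x - 1).toNat) = (-x - 1).toNat % 2 ^ 8 := by
      rw [Nat.and_comm]
      have e2 : (255 : Int).toNat = 2 ^ 8 - 1 := by decide
      rw [e2, Nat.and_two_pow_sub_one_eq_mod]
    rw [e]
    omega
  · exact absurd (by decide) h3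

theorem band_mask32_eq_emod (x : Int) : PySem.Int.band x 4294967295 = x % 4294967296 := by
  unfold PySem.Int.band
  split_ifs with h h2 h3
  · have e : (4294967295 : Int).toNat = 2 ^ 32 - 1 := by decide
    rw [e, Nat.and_two_pow_sub_one_eq_mod]
    omega
  · exact absurd (by decide) h2
  · have e : ((4294967295 : Int).toNat &&& (-x - 1).toNat) = (-x - 1).toNat % 2 ^ 32 := by
      rw [Nat.and_comm]
      have e2 : (4294967295 : Int).toNat = 2 ^ 32 - 1 := by decide
      rw [e2, Nat.and_two_pow_sub_one_eq_mod]
    rw [e]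
    omega
  · exact absurd (by decide) h3

theorem mask32_lt (x : Int) : mask32 x < 4294967296 := by
  unfold mask32
  rw [band_mask32_eq_emod]
  have h1 : 0 ≤ x % 4294967296 := Int.emod_nonneg x (by decide)
  have h2 : x % 4294967296 < 4294967296 := Int.emod_lt_of_pos x (by decide)
  omega

-- shift-or on disjoint bit ranges is multiply-add
theorem shiftor_eq (k a m : Nat) (h : m < 2 ^ k) :
    (a <<< k) ||| m = a * 2 ^ k + m := by
  apply Nat.eq_of_testBit_eq
  intro i
  rw [Nat.testBit_or, Nat.testBit_shiftLeft,
      show a * 2 ^ k + m = 2 ^ k * a + m by ring,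
      Nat.testBit_two_pow_mul_add a h i]
  by_cases hi : i < k
  · simp [hi, Nat.not_le.mpr hi]
  · have hmf : m.testBit i = false := Nat.testBit_eq_false_of_lt
      (lt_of_lt_of_le h (Nat.pow_le_pow_right (by norm_num) (by omega)))
    simp [hi, Nat.le_of_not_lt hi, hmf]

-- the little-endian value of a list of words
def val : List Int → Nat
  | [] => 0
  | x :: t => mask32 x + 4294967296 * val t

theorem val_lt (xs : List Int) : val xs < 2 ^ (32 * xs.length) := by
  induction xs with
  | nil => norm_num [val]
  | cons x t ih =>
    have hx := mask32_lt x
    have e : 2 ^ (32 * (x :: t).length) = 4294967296 * 2 ^ (32 * t.length) := by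
      rw [List.length_cons, show 32 * (t.length + 1) = 32 * t.length + 32 by ring, pow_add]
      norm_num
      ring
    rw [val, e]
    generalize 2 ^ (32 * t.length) = P at *
    omega

theorem val_append (u v : List Int) :
    val (u ++ v) = val u + 2 ^ (32 * u.length) * val v := by
  induction u with
  | nil => simp [val]
  | cons x t ih =>
    rw [List.cons_append, val, ih, val, List.length_cons,
        show 32 * (t.length + 1) = 32 * t.length + 32 by ring, pow_add]
    norm_num
    ring

-- pack computes the value of the word slice msg[lo:hi]
theorem pack_eq_val (msg : List Int) (d : Nat) : ∀ lo hi, hi - lo ≤ d → hi ≤ msg.length →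
    pack msg lo hi = val ((msg.drop lo).take (hi - lo)) := by
  induction d with
  | zero =>
    intro lo hi h hl
    have e : hi - lo = 0 := by omega
    rw [pack, if_pos (by omega), if_neg (by omega), e]
    simp [val]
  | succ d ih =>
    intro lo hi h hl
    rw [pack]
    by_cases h1 : hi - lo ≤ 1
    · rw [if_pos h1]
      by_cases h2 : lo < hi
      · rw [if_pos h2]
        have hlo : lo < msg.length := by omega
        have e : hi - lo = 1 := by omega
        rw [e, PySem.List.pyGetD_natCast,
            List.drop_eq_getElem_cons hlo, List.take_succ_cons, List.take_zero]
        simp [val, List.getElem?_eq_getElem hlo]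
      · rw [if_neg h2]
        have e : hi - lo = 0 := by omega
        simp [e, val]
    · rw [if_neg h1]
      have hlm : lo < (lo + hi) / 2 := by omega
      have hmh : (lo + hi) / 2 < hi := by omega
      have e1 := ih lo ((lo + hi) / 2) (by omega) (by omega)
      have e2 := ih ((lo + hi) / 2) hi (by omega) hl
      have hlen : ((msg.drop lo).take ((lo + hi) / 2 - lo)).length = (lo + hi) / 2 - lo := by
        simp only [List.length_take, List.length_drop]
        omega
      have hb : val ((msg.drop lo).take ((lo + hi) / 2 - lo)) < 2 ^ (32 * ((lo + hi) / 2 - lo)) := by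
        have hv := val_lt ((msg.drop lo).take ((lo + hi) / 2 - lo))
        rwa [hlen] at hv
      have split : (msg.drop lo).take (hi - lo) =
          (msg.drop lo).take ((lo + hi) / 2 - lo) ++ ((msg.drop ((lo + hi) / 2)).take (hi - (lo + hi) / 2)) := by
        rw [show hi - lo = ((lo + hi) / 2 - lo) + (hi - (lo + hi) / 2) by omega, List.take_add,
            List.drop_drop, show lo + ((lo + hi) / 2 - lo) = (lo + hi) / 2 by omega]
      show pack msg lo ((lo + hi) / 2) |||
           (pack msg ((lo + hi) / 2) hi <<< (32 * ((lo + hi) / 2 - lo))) = _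
      rw [e1, e2, Nat.lor_comm, shiftor_eq _ _ _ hb, split, val_append, hlen]
      ring

theorem pack_top (msg : List Int) : pack msg 0 msg.length = val msg := by
  rw [pack_eq_val msg msg.length 0 msg.length (by omega) le_rfl]
  simp

-- to_bytes splits over a low block of a digits
theorem toBytes_split (a : Nat) : ∀ (b n m : Nat), m < 256 ^ a →
    toBytesLE (a + b) (n * 256 ^ a + m) = toBytesLE a m ++ toBytesLE b n := by
  induction a with
  | zero =>
    intro b n m hm
    interval_cases m
    simp [toBytesLE]
  | succ a ih =>
    intro b n m hm
    have e0 : n * 256 ^ (a + 1) + m = (n * 256 ^ a) * 256 + m := by rw [pow_succ]; ring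
    have e1 : ((n * 256 ^ a) * 256 + m) % 256 = m % 256 := by
      generalize n * 256 ^ a = A; omega
    have e2 : ((n * 256 ^ a) * 256 + m) / 256 = n * 256 ^ a + m / 256 := by
      generalize n * 256 ^ a = A; omega
    have hm' : m / 256 < 256 ^ a := by
      have hlt : m < 256 ^ a * 256 := by rw [← pow_succ]; exact hm
      generalize hA : 256 ^ a = A at *; omega
    rw [show a + 1 + b = (a + b) + 1 from by omega, e0]
    show Char.ofNat (((n * 256 ^ a) * 256 + m) % 256) ::
         toBytesLE (a + b) (((n * 256 ^ a) * 256 + m) / 256) = _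
    rw [e1, e2, ih b n (m / 256) hm']
    rfl

theorem toBytesLE_four (m : Nat) :
    toBytesLE 4 m = [Char.ofNat (m % 256), Char.ofNat (m / 256 % 256),
       Char.ofNat (m / 65536 % 256), Char.ofNat (m / 16777216 % 256)] := by
  show Char.ofNat (m % 256) :: Char.ofNat (m / 256 % 256) ::
       Char.ofNat (m / 256 / 256 % 256) :: Char.ofNat (m / 256 / 256 / 256 % 256) :: toBytesLE 0 _ = _
  rw [toBytesLE]
  norm_num [Nat.div_div_eq_div_mul]

-- B's serialized buffer is the concatenation of 4-byte blocks
theorem toBytes_val (msg : List Int) :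
    toBytesLE (4 * msg.length) (val msg) =
    msg.flatMap (fun x =>
      let m : Nat := mask32 x
      [Char.ofNat (m % 256), Char.ofNat (m / 256 % 256),
       Char.ofNat (m / 65536 % 256), Char.ofNat (m / 16777216 % 256)]) := by
  induction msg with
  | nil => rfl
  | cons x t ih =>
    rw [List.flatMap_cons, ← ih, val,
        show mask32 x + 4294967296 * val t = val t * 256 ^ 4 + mask32 x by norm_num; ring,
        show 4 * (x :: t).length = 4 + 4 * t.length by simp [List.length_cons]; omega,
        toBytes_split 4 (4 * t.length) (val t) (mask32 x)
          (by have := mask32_lt x; norm_num; omega),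
        toBytesLE_four]

-- per element, A's four shift/&-extracted chars are the base-256 digits of the masked value
theorem bytes_eq (x : Int) :
    [Char.ofNat (PySem.Int.band x 255).toNat,
     Char.ofNat (PySem.Int.band (x >>> (8 : Nat)) 255).toNat,
     Char.ofNat (PySem.Int.band (x >>> (16 : Nat)) 255).toNat,
     Char.ofNat (PySem.Int.band (x >>> (24 : Nat)) 255).toNat] =
    (fun x : Int =>
      let m : Nat := mask32 x
      [Char.ofNat (m % 256), Char.ofNat (m / 256 % 256),
       Char.ofNat (m / 65536 % 256), Char.ofNat (m / 16777216 % 256)]) x := by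
  simp only [mask32, band_255_eq_emod, band_mask32_eq_emod, Int.shiftRight_eq_div_pow]
  norm_num
  refine ⟨?_, ?_, ?_, ?_⟩ <;> · apply congrArg; omega

theorem flatten_intersperse_nil (parts : List (List Char)) :
    (List.intersperse ([] : List Char) parts).flatten = parts.flatten := by
  induction parts with
  | nil => rfl
  | cons p t ih =>
    cases t with
    | nil => rfl
    | cons q u =>
      simp only [List.intersperse_cons₂, List.flatten_cons] at *
      simp [ih]

theorem join_nil_eq_flatten (parts : List (List Char)) :
    PySem.Chars.join [] parts = parts.flatten := by
  simp [PySem.Chars.join, List.intercalate, flatten_intersperse_nil]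

-- A's joined loop output equals B's serialized buffer
theorem payload_eq (msg : List Int) :
    PySem.Chars.join []
      ((PySem.List.pyRange 0 (msg.length : Int) 1).foldl
        (fun acc i =>
          let x := PySem.List.pyGetD msg i 0
          acc ++ [[Char.ofNat (PySem.Int.band x 255).toNat,
                   Char.ofNat (PySem.Int.band (x >>> (8 : Nat)) 255).toNat,
                   Char.ofNat (PySem.Int.band (x >>> (16 : Nat)) 255).toNat,
                   Char.ofNat (PySem.Int.band (x >>> (24 : Nat)) 255).toNat]]) []) =
    toBytesLE (4 * msg.length) (pack msg 0 msg.length) := by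
  rw [PySem.List.foldl_pyRange_zero_pyGetD' msg 0
        (fun acc x => acc ++ [[Char.ofNat (PySem.Int.band x 255).toNat,
                   Char.ofNat (PySem.Int.band (x >>> (8 : Nat)) 255).toNat,
                   Char.ofNat (PySem.Int.band (x >>> (16 : Nat)) 255).toNat,
                   Char.ofNat (PySem.Int.band (x >>> (24 : Nat)) 255).toNat]]) [],
      PySem.List.foldl_append_singleton_eq_map, join_nil_eq_flatten, pack_top, toBytes_val]
  simp only [List.nil_append]
  rw [← List.flatMap_def]
  exact List.flatMap_congr (fun x _ => bytes_eq x)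

-- ===== VERDICT (by name: the statement is the Claim_ definition above) =====
theorem lencode_spec : Claim_equal_lencode := by
  intro msg key _ _
  unfold Spec_lencode lencode lencode_alt
  simp only [payload_eq]
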